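-- pv_equiv track=rewrite | github.com/Moustov/cobol_tools | cobol_activity_diagram.py | split_cobol
-- ===== SOURCE A (Python) =====
-- def split_cobol(instructions: list) -> list:
--     instruction_buckets = []
--     bucket_size = 2000
--     bucket = []
--     for (line_num, instruction, line_indent) in instructions:
--         bucket.append((line_num, instruction, line_indent))
--         if len(bucket) > bucket_size:
--             if line_indent == 1:
--                 instruction_buckets.append(bucket)
--                 bucket = []
--     instruction_buckets.append(bucket)
--     return instruction_buckets
-- ===== SOURCE B (Python) =====
-- def split_cobol(instructions: list) -> list:
--     # Pass 1: find cut indices at indent-1 boundaries once the running count exceeds 2000.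
--     cuts = []
--     cnt = 0
--     for i, (_line_num, _instruction, line_indent) in enumerate(instructions):
--         cnt += 1
--         if cnt > 2000 and line_indent == 1:
--             cuts.append(i + 1)
--             cnt = 0
--     # Pass 2: slice the original list between consecutive cuts; always emit the trailing slice.
--     out = []
--     prev = 0
--     for c in cuts:
--         out.append(instructions[prev:c])
--         prev = c
--     out.append(instructions[prev:])
--     return out
-- ===== Notes on version B (the rewrite author's own statement) =====
-- stated objective: alternative
-- what changed: Replaces A's single fold that grows buckets element-by-element with a two-pass index-then-slice construction: one pass records cut indices from a running counter, a second pass slices the original list between consecutive cuts.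
import Mathlib
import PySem

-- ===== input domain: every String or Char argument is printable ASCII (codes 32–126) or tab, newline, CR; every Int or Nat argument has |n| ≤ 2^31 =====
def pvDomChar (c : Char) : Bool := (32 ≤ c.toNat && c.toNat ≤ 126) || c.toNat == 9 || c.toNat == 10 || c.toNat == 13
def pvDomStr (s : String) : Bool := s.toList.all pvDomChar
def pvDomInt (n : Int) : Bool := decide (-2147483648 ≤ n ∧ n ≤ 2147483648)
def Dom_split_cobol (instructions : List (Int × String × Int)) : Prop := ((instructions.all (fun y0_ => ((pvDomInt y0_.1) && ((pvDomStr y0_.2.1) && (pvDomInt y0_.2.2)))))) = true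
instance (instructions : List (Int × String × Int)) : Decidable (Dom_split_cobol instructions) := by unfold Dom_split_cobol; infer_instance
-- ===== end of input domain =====

-- B replaces A's element-by-element bucket building with a two-pass cut-index-then-slice construction (alternative decomposition; same O(n) cost).
-- ===== PORT A =====
-- A's loop: append each element to the current bucket; once the bucket exceeds 2000 and the
-- element's indent is 1, flush it; finally append the (possibly empty) trailing bucket.
def splitLoopA (xs : List (Int × String × Int)) (bs : List (List (Int × String × Int)))
    (b : List (Int × String × Int)) : List (List (Int × String × Int)) :=
  match xs with
  | [] => bs ++ [b]
  | x :: rest =>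
    let b' := b ++ [x]
    if b'.length > 2000 then
      if x.2.2 = 1 then splitLoopA rest (bs ++ [b']) []
      else splitLoopA rest bs b'
    else splitLoopA rest bs b'

def split_cobol (instructions : List (Int × String × Int)) : List (List (Int × String × Int)) :=
  splitLoopA instructions [] []

-- ===== PORT B =====
-- Pass 1 of Source B: running counter over the enumerated list, recording cut indices i+1.
def altCuts (xs : List (Int × String × Int)) (i cnt : Nat) : List Nat :=
  match xs with
  | [] => []
  | x :: rest =>
    if cnt + 1 > 2000 ∧ x.2.2 = 1 then (i + 1) :: altCuts rest (i + 1) 0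
    else altCuts rest (i + 1) (cnt + 1)

-- Pass 2 of Source B: instructions[prev:c] with 0 ≤ prev ≤ c is exactly (drop prev).take (c - prev);
-- the trailing instructions[prev:] is drop prev.
def altSlices (ys : List (Int × String × Int)) (prev : Nat) (cuts : List Nat) :
    List (List (Int × String × Int)) :=
  match cuts with
  | [] => [ys.drop prev]
  | c :: cs => ((ys.drop prev).take (c - prev)) :: altSlices ys c cs

def split_cobol_alt (instructions : List (Int × String × Int)) : List (List (Int × String × Int)) :=
  altSlices instructions 0 (altCuts instructions 0 0)

-- ===== PRECONDITION & SPEC =====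
def Spec_split_cobol (instructions : List (Int × String × Int)) (out : List (List (Int × String × Int))) : Prop := out = split_cobol_alt instructions
instance (instructions : List (Int × String × Int)) (out : List (List (Int × String × Int))) : Decidable (Spec_split_cobol instructions out) := by unfold Spec_split_cobol; infer_instance

-- ===== CLAIM (what is proved, stated in full; the proofs are below) =====
def Claim_equal_split_cobol : Prop := ∀ (instructions : List (Int × String × Int)), Dom_split_cobol instructions → Spec_split_cobol instructions (split_cobol instructions)

-- ===== LEMMAS AND PROOFS =====

-- buildB is splitLoopA with the accumulator factored out (proof-only helper).
def buildB (xs : List (Int × String × Int)) (b : List (Int × String × Int)) :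
    List (List (Int × String × Int)) :=
  match xs with
  | [] => [b]
  | x :: rest =>
    if b.length + 1 > 2000 ∧ x.2.2 = 1 then (b ++ [x]) :: buildB rest []
    else buildB rest (b ++ [x])

theorem loopA_eq_buildB (xs : List (Int × String × Int)) (bs : List (List (Int × String × Int)))
    (b : List (Int × String × Int)) : splitLoopA xs bs b = bs ++ buildB xs b := by
  induction xs generalizing bs b with
  | nil => simp [splitLoopA, buildB]
  | cons x rest ih =>
    simp only [splitLoopA, buildB, List.length_append, List.length_cons, List.length_nil]
    by_cases h1 : b.length + 1 > 2000
    · by_cases h2 : x.2.2 = 1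
      · simp [h1, h2, ih, List.append_assoc]
      · simp [h1, h2, ih]
    · simp [h1, ih]

theorem buildB_eq_slices (xs : List (Int × String × Int)) (i cnt : Nat)
    (ys b : List (Int × String × Int)) (hcnt : cnt ≤ i) (hb : b.length = cnt)
    (hdrop : ys.drop (i - cnt) = b ++ xs) :
    buildB xs b = altSlices ys (i - cnt) (altCuts xs i cnt) := by
  induction xs generalizing i cnt b with
  | nil =>
    simp only [buildB, altCuts, altSlices]
    rw [hdrop]; simp
  | cons x rest ih =>
    simp only [buildB, altCuts, hb]
    by_cases hc : cnt + 1 > 2000 ∧ x.2.2 = 1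
    · rw [if_pos hc, if_pos hc]
      simp only [altSlices]
      have e1 : List.take (i + 1 - (i - cnt)) (List.drop (i - cnt) ys) = b ++ [x] := by
        rw [hdrop, show i + 1 - (i - cnt) = b.length + 1 by omega, List.take_append]
        simp
      have h2 : ys.drop (i + 1 - 0) = [] ++ rest := by
        rw [show i + 1 - 0 = (i - cnt) + (cnt + 1) by omega, ← List.drop_drop, hdrop,
          show cnt + 1 = b.length + 1 by omega, List.drop_append]
        simp
      have e2 := ih (i + 1) 0 [] (by omega) rfl h2
      simp only [Nat.sub_zero] at e2
      rw [e1, e2]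
    · rw [if_neg hc, if_neg hc]
      have h2 : ys.drop (i + 1 - (cnt + 1)) = (b ++ [x]) ++ rest := by
        have : i + 1 - (cnt + 1) = i - cnt := by omega
        rw [this, hdrop]; simp
      have := ih (i + 1) (cnt + 1) (b ++ [x]) (by omega) (by simp [hb]) h2
      simpa [show i + 1 - (cnt + 1) = i - cnt by omega] using this

-- ===== VERDICT =====
theorem split_cobol_spec : Claim_equal_split_cobol := by
  intro instructions _
  unfold Spec_split_cobol split_cobol split_cobol_alt
  rw [loopA_eq_buildB]
  simpa using buildB_eq_slices instructions 0 0 instructions [] (by omega) rfl (by simp)
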